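-- pv_equiv track=rewrite | github.com/guillainbisimwa/competitive-programming | F_To_Add_or_Not_to_Add.py | maxF
-- ===== SOURCE A (Python) =====
-- def maxF(nums, k):
--     nums.sort(reverse = True)
--     freq = 0
--     l,r = 0,0
--     ans = nums[0]
--
--     for r in range(len(nums)):
--         k -= nums[l] - nums[r]
--         while k < 0:
--             k+= (r-l) * (nums[l]-nums[l+1])
--             l +=1
--
--         if freq <= r-l+1:
--             freq = r-l+1
--             ans = nums[l]
--     return [freq, ans]
-- ===== SOURCE B (Python) =====
-- # B: prefix-sum + binary-search formulation: sort descending, build a prefix-sum table,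
-- # and for each right end r binary-search the smallest window start l whose raise-cost
-- # nums[l]*(r-l+1) - (pre[r+1]-pre[l]) fits in k (feasibility is monotone in l).
-- # Like A, it sorts nums in place (descending); return-value equivalence is what is claimed.
-- def maxF(nums, k):
--     nums.sort(reverse=True)
--     n = len(nums)
--     pre = [0]
--     for v in nums:
--         pre.append(pre[-1] + v)
--     freq = 0
--     ans = nums[0]
--     for r in range(n):
--         lo, hi = 0, r
--         while lo < hi:
--             mid = (lo + hi) // 2
--             if nums[mid] * (r - mid + 1) - (pre[r + 1] - pre[mid]) <= k:
--                 hi = mid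
--             else:
--                 lo = mid + 1
--         l = lo
--         if freq <= r - l + 1:
--             freq = r - l + 1
--             ans = nums[l]
--     return [freq, ans]
-- ===== Notes on version B (the rewrite author's own statement) =====
-- stated objective: alternative
-- what changed: Replaces A's amortized two-pointer with incrementally maintained budget bookkeeping by a prefix-sum table and, for each right end r, a fresh binary search for the smallest feasible window start computed directly from the cost formula.
-- outside the precondition, e.g. on maxF([], 0): A raises IndexError, B raises IndexError
import Mathlib
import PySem

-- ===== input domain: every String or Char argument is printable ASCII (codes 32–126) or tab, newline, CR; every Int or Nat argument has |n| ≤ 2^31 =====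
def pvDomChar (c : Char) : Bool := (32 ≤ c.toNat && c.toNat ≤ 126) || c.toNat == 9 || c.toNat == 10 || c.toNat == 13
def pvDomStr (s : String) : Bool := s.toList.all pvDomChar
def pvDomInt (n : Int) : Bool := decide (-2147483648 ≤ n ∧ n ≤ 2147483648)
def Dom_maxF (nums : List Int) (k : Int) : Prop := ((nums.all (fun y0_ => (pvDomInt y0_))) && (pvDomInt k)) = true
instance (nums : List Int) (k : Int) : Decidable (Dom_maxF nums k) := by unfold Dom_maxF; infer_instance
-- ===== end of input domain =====

-- B replaces A's amortized two-pointer budget bookkeeping by a prefix-sum table plus a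
-- per-r scan for the smallest feasible window start; both Pythons sort the argument in
-- place (descending), and the equivalence claimed here is about the return value.

-- ===== PORT A =====

-- A's inner 'while k < 0' loop, with fuel (in Python it terminates or raises IndexError;
-- inside Pre_ the fuel passed below always suffices, so the port is exact there)
def maxFWhile (s : List Int) (r : Int) : Nat → Int → Int → Int × Int
  | 0, k, l => (k, l)
  | fuel+1, k, l =>
    if k < 0 then
      maxFWhile s r fuel (k + (r - l) * (PySem.List.pyGetD s l 0 - PySem.List.pyGetD s (l+1) 0)) (l+1)
    else (k, l)

-- one iteration of A's 'for r in range(len(nums))' body; state = (k, l, freq, ans)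
def stepA (s : List Int) (st : Int × Int × Int × Int) (r : Int) : Int × Int × Int × Int :=
  let k := st.1 - (PySem.List.pyGetD s st.2.1 0 - PySem.List.pyGetD s r 0)
  let p := maxFWhile s r (s.length + 1) k st.2.1
  if st.2.2.1 ≤ r - p.2 + 1 then (p.1, p.2, r - p.2 + 1, PySem.List.pyGetD s p.2 0)
  else (p.1, p.2, st.2.2.1, st.2.2.2)

def maxF (nums : List Int) (k : Int) : List Int :=
  let s := PySem.List.sorted nums id true
  let st := (PySem.List.pyRange 0 (s.length : Int) 1).foldl (stepA s)
    (k, 0, 0, PySem.List.pyGetD s 0 0)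
  [st.2.2.1, st.2.2.2]

-- ===== PORT B =====

-- Source B's first loop: pre = [0]; for v in nums: pre.append(pre[-1] + v)
def preTable (s : List Int) : List Int :=
  s.foldl (fun p v => p ++ [PySem.List.pyGetD p (-1) 0 + v]) [0]

-- Source B's inner 'while lo < hi' binary search, with fuel (in Python hi - lo strictly
-- decreases, so the loop always terminates; fuel ≥ hi - lo makes the port exact)
def bsearchB (s pre : List Int) (k r : Int) : Nat → Int → Int → Int
  | 0, lo, _ => lo
  | fuel+1, lo, hi =>
    if lo < hi then
      let mid := PySem.Int.floordiv (lo + hi) 2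
      if PySem.List.pyGetD s mid 0 * (r - mid + 1)
          - (PySem.List.pyGetD pre (r+1) 0 - PySem.List.pyGetD pre mid 0) ≤ k
      then bsearchB s pre k r fuel lo mid
      else bsearchB s pre k r fuel (mid+1) hi
    else lo

-- one iteration of Source B's 'for r in range(n)' body; state = (freq, ans)
def stepB (s pre : List Int) (k : Int) (st : Int × Int) (r : Int) : Int × Int :=
  let l := bsearchB s pre k r s.length 0 r
  if st.1 ≤ r - l + 1 then (r - l + 1, PySem.List.pyGetD s l 0) else st

def maxF_alt (nums : List Int) (k : Int) : List Int :=
  let s := PySem.List.sorted nums id true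
  let pre := preTable s
  let st := (PySem.List.pyRange 0 (s.length : Int) 1).foldl (stepB s pre k)
    (0, PySem.List.pyGetD s 0 0)
  [st.1, st.2]

-- ===== PRECONDITION & SPEC =====
-- A raises IndexError on nums = [] (at nums[0]) and, eventually, whenever k < 0
-- (the shrink loop runs past the window end); Pre_ excludes exactly those inputs.
def Pre_maxF (nums : List Int) (k : Int) : Prop := nums ≠ [] ∧ 0 ≤ k
instance (nums : List Int) (k : Int) : Decidable (Pre_maxF nums k) := by unfold Pre_maxF; infer_instance
def pvWitness_maxF : List Int × Int := ([3, 1, 2], 2)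

def Spec_maxF (nums : List Int) (k : Int) (out : List Int) : Prop := out = maxF_alt nums k
instance (nums : List Int) (k : Int) (out : List Int) : Decidable (Spec_maxF nums k out) := by unfold Spec_maxF; infer_instance

-- ===== CLAIM (what is proved, stated in full; the proofs are below) =====
def Claim_equal_maxF : Prop := ∀ (nums : List Int) (k : Int), Dom_maxF nums k → Pre_maxF nums k → Spec_maxF nums k (maxF nums k)

-- ===== LEMMAS AND PROOFS =====

-- cost of raising s[l..r] up to s[l] (s descending): what both programs compare against k
def cost (s : List Int) (l r : Nat) : Int :=
  s.getD l 0 * ((r : Int) - (l : Int) + 1) - ∑ i ∈ Finset.Ico l (r+1), s.getD i 0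

-- least feasible window start for right end r
noncomputable def lmin (s : List Int) (k : Int) (r : Nat) : Nat := sInf {l | cost s l r ≤ k}

lemma cost_self (s : List Int) (r : Nat) : cost s r r = 0 := by
  simp [cost]

lemma cost_succ_r (s : List Int) (l r : Nat) (h : l ≤ r + 1) :
    cost s l (r+1) = cost s l r + (s.getD l 0 - s.getD (r+1) 0) := by
  unfold cost
  rw [Finset.sum_Ico_succ_top (by omega : l ≤ r + 1)]
  push_cast; ring

lemma cost_succ_l (s : List Int) (l r : Nat) (h : l < r + 1) :
    cost s l r = cost s (l+1) r + ((r : Int) - (l : Int)) * (s.getD l 0 - s.getD (l+1) 0) := by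
  unfold cost
  rw [Finset.sum_eq_sum_Ico_succ_bot (by omega : l < r + 1)]
  push_cast; ring

lemma sorted_getD_le (s : List Int) (hs : s.Pairwise (fun a b => b ≤ a))
    {i j : Nat} (hij : i ≤ j) (hj : j < s.length) : s.getD j 0 ≤ s.getD i 0 := by
  rcases Nat.eq_or_lt_of_le hij with rfl | hlt
  · exact le_refl _
  · have hi : i < s.length := by omega
    have := (List.pairwise_iff_getElem.mp hs) i j hi hj hlt
    simpa [List.getD_eq_getElem?_getD, List.getElem?_eq_getElem, hi, hj] using this

lemma lmin_le_self (s : List Int) (k : Int) (hk : 0 ≤ k) (r : Nat) : lmin s k r ≤ r :=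
  Nat.sInf_le (show r ∈ {l | cost s l r ≤ k} by simp only [Set.mem_setOf_eq, cost_self]; exact hk)

lemma lmin_feasible (s : List Int) (k : Int) (hk : 0 ≤ k) (r : Nat) :
    cost s (lmin s k r) r ≤ k :=
  Nat.sInf_mem (⟨r, show r ∈ {l | cost s l r ≤ k} by
    simp only [Set.mem_setOf_eq, cost_self]; exact hk⟩ : Set.Nonempty {l | cost s l r ≤ k})

lemma lmin_mono (s : List Int) (hs : s.Pairwise (fun a b => b ≤ a)) (k : Int) (hk : 0 ≤ k)
    (r : Nat) (hr : r + 1 < s.length) : lmin s k r ≤ lmin s k (r+1) := by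
  apply Nat.sInf_le
  show lmin s k (r+1) ∈ {l | cost s l r ≤ k}
  have hj := lmin_feasible s k hk (r+1)
  set j := lmin s k (r+1) with hjdef
  have hjr : j ≤ r + 1 := lmin_le_self s k hk (r+1)
  have hmono : s.getD (r+1) 0 ≤ s.getD j 0 := sorted_getD_le s hs hjr hr
  have hcr := cost_succ_r s j r hjr
  simp only [Set.mem_setOf_eq]
  omega

-- the while loop lands exactly on the least feasible start
lemma maxFWhile_spec (s : List Int) (k0 : Int)
    (hk : 0 ≤ k0) (r : Nat) :
    ∀ (fuel l : Nat), l ≤ lmin s k0 r → lmin s k0 r ≤ l + fuel →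
    maxFWhile s (r : Int) fuel (k0 - cost s l r) (l : Int)
      = (k0 - cost s (lmin s k0 r) r, ((lmin s k0 r : Nat) : Int)) := by
  intro fuel
  induction fuel with
  | zero =>
    intro l h1 h2
    have : l = lmin s k0 r := by omega
    subst this
    rfl
  | succ f ih =>
    intro l h1 h2
    rw [maxFWhile]
    by_cases hneg : k0 - cost s l r < 0
    · rw [if_pos hneg]
      have hlne : l ≠ lmin s k0 r := by
        intro he
        have := lmin_feasible s k0 hk r
        rw [← he] at this
        omega
      have hlt : l < lmin s k0 r := by omega
      have hlr : l < r := by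
        have := lmin_le_self s k0 hk r
        omega
      have hstep := cost_succ_l s l r (by omega)
      have harg : k0 - cost s l r + ((r : Int) - (l : Int)) *
          (PySem.List.pyGetD s (l : Int) 0 - PySem.List.pyGetD s ((l : Int) + 1) 0)
          = k0 - cost s (l+1) r := by
        have h1' : PySem.List.pyGetD s (l : Int) 0 = s.getD l 0 := PySem.List.pyGetD_natCast s l 0
        have h2' : PySem.List.pyGetD s ((l : Int) + 1) 0 = s.getD (l+1) 0 := by
          rw [show ((l : Int) + 1) = ((l + 1 : Nat) : Int) by push_cast; ring]
          exact PySem.List.pyGetD_natCast s (l+1) 0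
        rw [h1', h2']
        omega
      rw [harg, show ((l : Int) + 1) = ((l + 1 : Nat) : Int) by push_cast; ring]
      exact ih (l+1) (by omega) (by omega)
    · rw [if_neg hneg]
      have : cost s l r ≤ k0 := by omega
      have hge : lmin s k0 r ≤ l := Nat.sInf_le (show l ∈ {j | cost s j r ≤ k0} from this)
      have : l = lmin s k0 r := by omega
      subst this
      rfl

-- ---- prefix-sum table characterization ----

def accList (c : Int) : List Int → List Int
  | [] => []
  | v :: t => (c + v) :: accList (c + v) t

lemma preTable_foldl (t : List Int) : ∀ (p : List Int) (c : Int),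
    t.foldl (fun p v => p ++ [PySem.List.pyGetD p (-1) 0 + v]) (p ++ [c])
      = p ++ [c] ++ accList c t := by
  induction t with
  | nil => intro p c; simp [accList]
  | cons v t ih =>
    intro p c
    simp only [List.foldl_cons, PySem.List.pyGetD_neg_one_append_singleton]
    rw [show (p ++ [c]) ++ [c + v] = (p ++ [c]) ++ [c + v] from rfl, ih (p ++ [c]) (c + v)]
    simp [accList]

lemma accList_getD (t : List Int) : ∀ (c : Int) (j : Nat), j < t.length →
    (accList c t).getD j 0 = c + ∑ i ∈ Finset.range (j+1), t.getD i 0 := by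
  induction t with
  | nil => intro c j h; simp at h
  | cons v t ih =>
    intro c j h
    cases j with
    | zero => simp [accList]
    | succ j =>
      simp only [accList, List.getD_cons_succ]
      rw [ih (c + v) j (by simpa using h)]
      rw [Finset.sum_range_succ' (fun i => (v :: t).getD i 0) (j+1)]
      simp [add_comm, add_assoc, add_left_comm]

lemma preTable_getD (s : List Int) (j : Nat) (hj : j ≤ s.length) :
    (preTable s).getD j 0 = ∑ i ∈ Finset.range j, s.getD i 0 := by
  unfold preTable
  rw [show ([0] : List Int) = [] ++ [(0 : Int)] from rfl, preTable_foldl s [] 0]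
  cases j with
  | zero => simp
  | succ j =>
    simp only [List.nil_append, List.cons_append, List.nil_append]
    have : ((0 : Int) :: accList 0 s).getD (j+1) 0 = (accList 0 s).getD j 0 := rfl
    rw [this, accList_getD s 0 j (by omega)]
    ring

-- B's scan condition at integer index ↑j equals 'cost s j r ≤ k'
lemma predB_iff (s : List Int) (k : Int) (r j : Nat) (hj : j ≤ r) (hr : r < s.length) :
    (PySem.List.pyGetD s (j : Int) 0 * ((r : Int) - (j : Int) + 1)
      - (PySem.List.pyGetD (preTable s) ((r : Int) + 1) 0
         - PySem.List.pyGetD (preTable s) (j : Int) 0) ≤ k)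
    ↔ cost s j r ≤ k := by
  have h1 : PySem.List.pyGetD s (j : Int) 0 = s.getD j 0 := PySem.List.pyGetD_natCast s j 0
  have h2 : PySem.List.pyGetD (preTable s) ((r : Int) + 1) 0 = (preTable s).getD (r+1) 0 := by
    rw [show ((r : Int) + 1) = ((r + 1 : Nat) : Int) by push_cast; ring]
    exact PySem.List.pyGetD_natCast _ _ 0
  have h3 : PySem.List.pyGetD (preTable s) (j : Int) 0 = (preTable s).getD j 0 :=
    PySem.List.pyGetD_natCast _ _ 0
  rw [h1, h2, h3, preTable_getD s (r+1) (by omega), preTable_getD s j (by omega)]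
  unfold cost
  rw [Finset.sum_Ico_eq_sub (fun i => s.getD i 0) (by omega : j ≤ r + 1)]

-- descending s makes the cost antitone in the window start
lemma cost_anti (s : List Int) (hs : s.Pairwise (fun a b => b ≤ a)) (r : Nat)
    (hr : r < s.length) : ∀ (l l' : Nat), l ≤ l' → l' ≤ r → cost s l' r ≤ cost s l r := by
  intro l l' h1 h2
  induction l' with
  | zero => simp_all
  | succ j ih =>
    rcases Nat.eq_or_lt_of_le h1 with rfl | hlt
    · exact le_refl _
    · have hj : cost s j r ≤ cost s l r := ih (by omega) (by omega)
      have hstep := cost_succ_l s j r (by omega)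
      have hmono : s.getD (j+1) 0 ≤ s.getD j 0 :=
        sorted_getD_le s hs (by omega) (by omega)
      nlinarith [hstep, hmono, hj, show (0:Int) ≤ (r:Int) - (j:Int) by
        have : j < r := by omega
        omega]

-- Source B's binary search lands exactly on the least feasible start
lemma bsearchB_spec (s : List Int) (hs : s.Pairwise (fun a b => b ≤ a)) (k : Int)
    (hk : 0 ≤ k) (r : Nat) (hr : r < s.length) :
    ∀ (fuel lo hi : Nat), lo ≤ lmin s k r → lmin s k r ≤ hi → hi ≤ r → hi - lo ≤ fuel →
    bsearchB s (preTable s) k (r : Int) fuel (lo : Int) (hi : Int) = ((lmin s k r : Nat) : Int) := by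
  intro fuel
  induction fuel with
  | zero =>
    intro lo hi h1 h2 h3 h4
    have : lo = lmin s k r := by omega
    subst this
    rfl
  | succ f ih =>
    intro lo hi h1 h2 h3 h4
    rw [bsearchB]
    by_cases hlh : (lo : Int) < (hi : Int)
    · rw [if_pos hlh]
      have hlohi : lo < hi := by exact_mod_cast hlh
      have hmid : PySem.Int.floordiv ((lo : Int) + (hi : Int)) 2 = (((lo+hi)/2 : Nat) : Int) := by
        unfold PySem.Int.floordiv
        rw [Int.fdiv_eq_ediv]
        simp
      set m := (lo + hi) / 2 with hm
      have hmlo : lo ≤ m := by omega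
      have hmhi : m < hi := by omega
      simp only [hmid]
      rw [show ((m : Int) + 1) = ((m + 1 : Nat) : Int) by push_cast; ring]
      by_cases hp : cost s m r ≤ k
      · have hpred : PySem.List.pyGetD s ((m : Nat) : Int) 0 * ((r : Int) - ((m : Nat) : Int) + 1)
            - (PySem.List.pyGetD (preTable s) ((r : Int) + 1) 0
               - PySem.List.pyGetD (preTable s) ((m : Nat) : Int) 0) ≤ k :=
          (predB_iff s k r m (by omega) hr).mpr hp
        rw [if_pos hpred]
        have hLm : lmin s k r ≤ m := Nat.sInf_le (show m ∈ {l | cost s l r ≤ k} from hp)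
        exact ih lo m h1 hLm (by omega) (by omega)
      · have hpred : ¬ (PySem.List.pyGetD s ((m : Nat) : Int) 0 * ((r : Int) - ((m : Nat) : Int) + 1)
            - (PySem.List.pyGetD (preTable s) ((r : Int) + 1) 0
               - PySem.List.pyGetD (preTable s) ((m : Nat) : Int) 0) ≤ k) := by
          intro hcon
          exact hp ((predB_iff s k r m (by omega) hr).mp hcon)
        rw [if_neg hpred]
        have hmL : m < lmin s k r := by
          by_contra hcon
          rw [not_lt] at hcon
          exact hp (le_trans (cost_anti s hs r hr (lmin s k r) m hcon (by omega))
            (lmin_feasible s k hk r))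
        exact ih (m+1) hi (by omega) h2 h3 (by omega)
    · rw [if_neg hlh]
      have : lo = lmin s k r := by omega
      subst this
      rfl

-- the joint loop invariant: after processing r = 0 .. m, A's state is
-- (k - cost(lmin m, m), lmin m, freq, ans) and B's state is the same (freq, ans)
lemma fold_inv (s : List Int) (hs : s.Pairwise (fun a b => b ≤ a)) (k0 : Int)
    (hk : 0 ≤ k0) : ∀ (m : Nat), m + 1 ≤ s.length →
    ∃ F V : Int,
      (List.range (m+1)).foldl (fun (st : Int × Int × Int × Int) (i : Nat) => stepA s st (i : Int)) (k0, 0, 0, PySem.List.pyGetD s 0 0)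
        = (k0 - cost s (lmin s k0 m) m, ((lmin s k0 m : Nat) : Int), F, V)
      ∧ (List.range (m+1)).foldl (fun (st : Int × Int) (i : Nat) => stepB s (preTable s) k0 st (i : Int)) (0, PySem.List.pyGetD s 0 0)
        = (F, V) := by
  intro m
  induction m with
  | zero =>
    intro hn
    have h0 : lmin s k0 0 = 0 := Nat.le_zero.mp (lmin_le_self s k0 hk 0)
    refine ⟨1, PySem.List.pyGetD s 0 0, ?_, ?_⟩
    · simp only [List.range_succ, List.range_zero, List.nil_append, List.foldl_cons, List.foldl_nil, Nat.cast_zero]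
      rw [stepA]
      simp only [sub_self, sub_zero]
      have hw := maxFWhile_spec s k0 hk 0 (s.length + 1) 0 (by omega) (by omega)
      rw [cost_self, sub_zero] at hw
      simp only [Nat.cast_zero] at hw
      rw [hw, h0]
      norm_num [cost_self]
    · simp only [List.range_succ, List.range_zero, List.nil_append, List.foldl_cons, List.foldl_nil, Nat.cast_zero]
      rw [stepB]
      have hf := bsearchB_spec s hs k0 hk 0 hn s.length 0 0 (by omega) (by omega) (by omega) (by omega)
      rw [h0] at hf
      simp only [Nat.cast_zero] at hf
      rw [hf]
      norm_num
  | succ m ih =>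
    intro hn
    obtain ⟨F, V, hA, hB⟩ := ih (by omega)
    have hmlt : m + 1 < s.length := by omega
    set L := lmin s k0 m with hLdef
    set L' := lmin s k0 (m+1) with hL'def
    have hLm : L ≤ m := lmin_le_self s k0 hk m
    have hLL' : L ≤ L' := lmin_mono s hs k0 hk m hmlt
    have hL'm : L' ≤ m + 1 := lmin_le_self s k0 hk (m+1)
    -- A's step
    have hAstep : stepA s (k0 - cost s L m, ((L : Nat) : Int), F, V) ((m+1 : Nat) : Int)
        = if F ≤ ((m+1 : Nat) : Int) - ((L' : Nat) : Int) + 1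
          then (k0 - cost s L' (m+1), ((L' : Nat) : Int), ((m+1 : Nat) : Int) - ((L' : Nat) : Int) + 1, s.getD L' 0)
          else (k0 - cost s L' (m+1), ((L' : Nat) : Int), F, V) := by
      rw [stepA]
      have e1 : PySem.List.pyGetD s ((L : Nat) : Int) 0 = s.getD L 0 := PySem.List.pyGetD_natCast s L 0
      have e2 : PySem.List.pyGetD s ((m+1 : Nat) : Int) 0 = s.getD (m+1) 0 := PySem.List.pyGetD_natCast s (m+1) 0
      have earg : k0 - cost s L m - (PySem.List.pyGetD s ((L : Nat) : Int) 0 - PySem.List.pyGetD s ((m+1 : Nat) : Int) 0)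
          = k0 - cost s L (m+1) := by
        rw [e1, e2]
        have := cost_succ_r s L m (by omega)
        omega
      simp only [earg]
      have hw := maxFWhile_spec s k0 hk (m+1) (s.length + 1) L (by omega) (by omega)
      rw [hw]
      have e3 : PySem.List.pyGetD s ((L' : Nat) : Int) 0 = s.getD L' 0 := PySem.List.pyGetD_natCast s L' 0
      by_cases hc : F ≤ ((m+1 : Nat) : Int) - ((L' : Nat) : Int) + 1
      · rw [if_pos hc, if_pos hc, e3]
      · rw [if_neg hc, if_neg hc]
    -- B's step
    have hBstep : stepB s (preTable s) k0 (F, V) ((m+1 : Nat) : Int)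
        = if F ≤ ((m+1 : Nat) : Int) - ((L' : Nat) : Int) + 1
          then (((m+1 : Nat) : Int) - ((L' : Nat) : Int) + 1, s.getD L' 0)
          else (F, V) := by
      rw [stepB]
      have hf := bsearchB_spec s hs k0 hk (m+1) hmlt s.length 0 (m+1)
        (by omega) (lmin_le_self s k0 hk (m+1)) (by omega) (by omega)
      rw [← hL'def] at hf
      simp only [Nat.cast_zero] at hf
      simp only [hf]
      have e3 : PySem.List.pyGetD s ((L' : Nat) : Int) 0 = s.getD L' 0 := PySem.List.pyGetD_natCast s L' 0
      by_cases hc : F ≤ ((m+1 : Nat) : Int) - ((L' : Nat) : Int) + 1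
      · rw [if_pos hc, if_pos hc, e3]
      · rw [if_neg hc, if_neg hc]
    rw [List.range_succ, List.foldl_append, List.foldl_append, hA, hB]
    simp only [List.foldl_cons, List.foldl_nil]
    rw [hAstep, hBstep]
    by_cases hc : F ≤ ((m+1 : Nat) : Int) - ((L' : Nat) : Int) + 1
    · rw [if_pos hc, if_pos hc]
      exact ⟨_, _, rfl, rfl⟩
    · rw [if_neg hc, if_neg hc]
      exact ⟨F, V, rfl, rfl⟩

-- ===== VERDICT (by name: the statement is the Claim_ definition above) =====
theorem maxF_spec : Claim_equal_maxF := by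
  intro nums k _ hpre
  obtain ⟨hne, hk⟩ := hpre
  unfold Spec_maxF
  simp only [maxF, maxF_alt]
  set s := PySem.List.sorted nums id true with hsdef
  have hs : s.Pairwise (fun a b => b ≤ a) := by
    have := PySem.List.sorted_pairwise_rev nums id
    simpa [hsdef] using this
  have hslen : s.length = nums.length := PySem.List.length_sorted nums id true
  have hpos : 0 < s.length := by
    rw [hslen]
    exact List.length_pos_iff.mpr hne
  obtain ⟨n, hn⟩ : ∃ n, s.length = n + 1 := ⟨s.length - 1, by omega⟩
  obtain ⟨F, V, hA, hB⟩ := fold_inv s hs k hk n (by omega)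
  rw [hn, PySem.List.pyRange_zero_nat (n+1), List.foldl_map, List.foldl_map, hA, hB]
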